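-- pv_equiv track=rewrite | github.com/Lyndakhazem/Forme-Normale-grammaire-algebrique | src/generer.py | extraire_symboles_dans_mot
-- ===== SOURCE A (Python) =====
-- def extraire_symboles_dans_mot(mot):
--     '''
--         Découpe un en symboles (terminaux et non-terminaux).
--         Exemple : si mot ="aA1B2" sera découpé en ["a","A1", "B2"]
--         Arguments:
--             mot: La production à découper (chaîne de caractères).
--         return Liste des symboles separer.
--     '''
--     symbols = []
--     i = 0
--     while i < len(mot):
--         if mot[i].isupper() and i + 1 < len(mot) and mot[i+1].isdigit():  # Non-terminal
--             symbols.append(mot[i:i+2])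
--             i += 2  # On saute ces deux caractères
--         else:
--             symbols.append(mot[i])  # Ajouter un terminal compris 'E'
--             i += 1
--     return symbols
-- ===== SOURCE B (Python) =====
-- def extraire_symboles_dans_mot(mot):
--     """One-pass scan over the characters with a 'pending uppercase' state
--     instead of an index-advancing loop with lookahead."""
--     symbols = []
--     pending = None
--     for c in mot:
--         if pending is not None:
--             if c.isdigit():
--                 symbols.append(pending + c)
--                 pending = None
--                 continue
--             symbols.append(pending)
--             pending = None
--         if c.isupper():
--             pending = c
--         else:
--             symbols.append(c)
--     if pending is not None:
--         symbols.append(pending)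
--     return symbols
-- ===== Notes on version B (the rewrite author's own statement) =====
-- stated objective: faster
-- what changed: Replaces A's index-advancing while loop with two-character lookahead and slicing by a single left fold over the characters that carries an optional buffered uppercase letter as state, with no indexing at all.
import Mathlib
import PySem

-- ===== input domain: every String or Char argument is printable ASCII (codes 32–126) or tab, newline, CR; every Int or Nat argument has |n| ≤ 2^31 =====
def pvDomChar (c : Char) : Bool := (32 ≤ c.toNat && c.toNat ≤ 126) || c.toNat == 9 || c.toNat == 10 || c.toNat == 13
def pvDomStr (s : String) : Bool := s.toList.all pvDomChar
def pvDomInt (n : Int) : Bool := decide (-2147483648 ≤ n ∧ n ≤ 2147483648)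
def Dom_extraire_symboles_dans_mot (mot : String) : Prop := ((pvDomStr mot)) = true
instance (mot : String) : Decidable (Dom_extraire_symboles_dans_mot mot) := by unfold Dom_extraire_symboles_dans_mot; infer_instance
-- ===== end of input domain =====

-- B: one left fold over the characters with a buffered-uppercase state instead of A's indexed while loop; measurably faster by a constant factor (no per-step indexing/slicing).
-- left fold over the characters carrying a 'pending uppercase' state; same return value.

-- ===== PORT A =====
-- while-loop over index i; 'mot[i+1]' read with getD, guarded by 'i + 1 < len(mot)' as in A
def pvALoop (cs : List Char) (i : Nat) (symbols : List String) : List String :=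
  if h : i < cs.length then
    if PySem.Chars.isupper cs[i] && decide (i + 1 < cs.length)
        && PySem.Chars.isdigit (cs.getD (i + 1) ' ') then
      pvALoop cs (i + 2) (symbols ++ [String.ofList (PySem.List.slice cs (some (i : Int)) (some ((i : Int) + 2)))])
    else
      pvALoop cs (i + 1) (symbols ++ [String.ofList [cs[i]]])
  else symbols
termination_by cs.length - i

def extraire_symboles_dans_mot (mot : String) : List String :=
  pvALoop mot.toList 0 []

-- ===== PORT B =====
-- one step of Source B's for-loop: state = (symbols so far, pending uppercase char)
def pvBStep (st : List String × Option Char) (c : Char) : List String × Option Char :=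
  match st with
  | (symbols, some p) =>
      if PySem.Chars.isdigit c then (symbols ++ [String.ofList [p, c]], none)
      else if PySem.Chars.isupper c then (symbols ++ [String.ofList [p]], some c)
      else (symbols ++ [String.ofList [p], String.ofList [c]], none)
  | (symbols, none) =>
      if PySem.Chars.isupper c then (symbols, some c)
      else (symbols ++ [String.ofList [c]], none)

-- the 'if pending is not None: symbols.append(pending)' after the loop
def pvBFin (st : List String × Option Char) : List String :=
  match st.2 with
  | some p => st.1 ++ [String.ofList [p]]
  | none => st.1

def extraire_symboles_dans_mot_alt (mot : String) : List String :=
  pvBFin (mot.toList.foldl pvBStep ([], none))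

-- ===== PRECONDITION & SPEC =====
def Spec_extraire_symboles_dans_mot (mot : String) (out : List String) : Prop := out = extraire_symboles_dans_mot_alt mot
instance (mot : String) (out : List String) : Decidable (Spec_extraire_symboles_dans_mot mot out) := by unfold Spec_extraire_symboles_dans_mot; infer_instance

-- ===== CLAIM (what is proved, stated in full; the proofs are below) =====
def Claim_equal_extraire_symboles_dans_mot : Prop := ∀ (mot : String), Dom_extraire_symboles_dans_mot mot → Spec_extraire_symboles_dans_mot mot (extraire_symboles_dans_mot mot)

-- ===== LEMMAS AND PROOFS =====

-- reference: the symbol split as a structural recursion on the character list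
def fSym : List Char → List String
  | [] => []
  | [c] => [String.ofList [c]]
  | c :: d :: rest =>
      if PySem.Chars.isupper c && PySem.Chars.isdigit d then
        String.ofList [c, d] :: fSym rest
      else
        String.ofList [c] :: fSym (d :: rest)

lemma pvALoop_eq (cs : List Char) (i : Nat) (acc : List String) :
    pvALoop cs i acc = acc ++ fSym (cs.drop i) := by
  induction i, acc using pvALoop.induct cs with
  | case1 i acc h hc ih =>
      rw [pvALoop]
      simp only [h, hc, dite_true, if_true]
      rw [ih]
      simp only [Bool.and_eq_true, decide_eq_true_eq] at hc
      obtain ⟨⟨h1, h2⟩, h3⟩ := hc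
      rw [List.getD_eq_getElem cs ' ' h2] at h3
      have hdrop : cs.drop i = cs[i] :: cs[i+1] :: cs.drop (i + 2) := by
        rw [List.drop_eq_getElem_cons h, List.drop_eq_getElem_cons h2]
      have hslice : PySem.List.slice cs (some (i : Int)) (some ((i : Int) + 2))
          = [cs[i], cs[i+1]] := by
        have : ((i : Int) + 2) = ((i + 2 : Nat) : Int) := by push_cast; ring
        rw [this, PySem.List.slice_toNat cs (by positivity) (by positivity)]
        simp only [Int.toNat_natCast]
        rw [hdrop, Nat.add_sub_cancel_left]
        rfl
      rw [hdrop, hslice, fSym, if_pos (by simp [h1, h3])]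
      simp
  | case2 i acc h hc ih =>
      rw [pvALoop]
      simp only [h, hc, dite_true]
      rw [ih]
      have hdrop : cs.drop i = cs[i] :: cs.drop (i + 1) := List.drop_eq_getElem_cons h
      rw [hdrop]
      rcases hd1 : cs.drop (i + 1) with _ | ⟨d, rest⟩
      · simp [fSym]
      · have h2 : i + 1 < cs.length := by
          by_contra hn
          rw [List.drop_eq_nil_of_le (by omega)] at hd1
          exact absurd hd1 (by simp)
        have hdval : d = cs[i+1] := by
          rw [List.drop_eq_getElem_cons h2] at hd1
          exact (List.cons.injEq _ _ _ _ ▸ hd1).1.symm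
        have hcond : ¬ (PySem.Chars.isupper cs[i] && PySem.Chars.isdigit d) = true := by
          intro hcontra
          apply hc
          simp only [Bool.and_eq_true, decide_eq_true_eq] at hcontra ⊢
          refine ⟨⟨hcontra.1, h2⟩, ?_⟩
          rw [List.getD_eq_getElem cs ' ' h2, ← hdval]
          exact hcontra.2
        rw [fSym, if_neg hcond]
        simp
  | case3 i acc h =>
      rw [pvALoop]
      simp only [h, dite_false]
      rw [List.drop_eq_nil_of_le (by omega)]
      simp [fSym]

lemma pvB_invariant (cs : List Char) :
    (∀ acc : List String, pvBFin (cs.foldl pvBStep (acc, none)) = acc ++ fSym cs) ∧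
    (∀ (acc : List String) (p : Char), PySem.Chars.isupper p = true →
      pvBFin (cs.foldl pvBStep (acc, some p)) = acc ++ fSym (p :: cs)) := by
  induction cs with
  | nil => exact ⟨fun acc => by simp [pvBFin, fSym], fun acc p _ => by simp [pvBFin, fSym]⟩
  | cons c rest ih =>
      obtain ⟨ihn, ihs⟩ := ih
      constructor
      · intro acc
        simp only [List.foldl_cons, pvBStep]
        by_cases hu : PySem.Chars.isupper c = true
        · rw [if_pos hu, ihs acc c hu]
        · rw [if_neg hu, ihn]
          rcases rest with _ | ⟨d, rest'⟩
          · simp [fSym]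
          · rw [fSym, if_neg (by simp [hu])]
            simp
      · intro acc p hp
        simp only [List.foldl_cons, pvBStep]
        by_cases hd : PySem.Chars.isdigit c = true
        · rw [if_pos hd, ihn, fSym, if_pos (by simp [hp, hd])]
          simp
        · rw [if_neg hd]
          have hpair : ¬ (PySem.Chars.isupper p && PySem.Chars.isdigit c) = true := by
            simp [hd]
          by_cases hu : PySem.Chars.isupper c = true
          · rw [if_pos hu, ihs (acc ++ [String.ofList [p]]) c hu, fSym, if_neg hpair]
            simp
          · rw [if_neg hu, ihn]
            rw [fSym, if_neg hpair]
            rcases rest with _ | ⟨d, rest'⟩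
            · simp [fSym]
            · rw [fSym, if_neg (by simp [hu])]
              simp

-- ===== VERDICT (by name: the statement is the Claim_ definition above) =====
theorem extraire_symboles_dans_mot_spec : Claim_equal_extraire_symboles_dans_mot := by
  intro mot _
  unfold Spec_extraire_symboles_dans_mot extraire_symboles_dans_mot extraire_symboles_dans_mot_alt
  rw [pvALoop_eq, (pvB_invariant mot.toList).1]
  simp
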